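-- pv_equiv track=rewrite | github.com/arminAnderson/CodeCompetitions | ProjectEuler/Python/PermutatedMultiples.py | HasDigits
-- ===== SOURCE A (Python) =====
-- def HasDigits(ref, target):
--     s = set()
--     while ref > 0:
--         s.add(ref % 10)
--         ref //= 10
--     size = len(s)
--     while target > 0:
--         s.add(target % 10)
--         target //= 10
--         if len(s) > size:
--             return False
--     return True
-- ===== SOURCE B (Python) =====
-- def HasDigits(ref, target):
--     # No digit set is built: for each digit of target, rescan ref's digits directly.
--     t = target
--     while t > 0:
--         d = t % 10
--         r = ref
--         while True:
--             if r <= 0: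
--                 return False
--             if r % 10 == d:
--                 break
--             r //= 10
--         t //= 10
--     return True
-- ===== Notes on version B (the rewrite author's own statement) =====
-- stated objective: alternative
-- what changed: A builds a membership structure (a growing digit set with an early-exit size check); B builds no structure at all and instead rescans ref's digits with a fresh inner arithmetic loop for every digit of target (nested brute-force scan).
import Mathlib
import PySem

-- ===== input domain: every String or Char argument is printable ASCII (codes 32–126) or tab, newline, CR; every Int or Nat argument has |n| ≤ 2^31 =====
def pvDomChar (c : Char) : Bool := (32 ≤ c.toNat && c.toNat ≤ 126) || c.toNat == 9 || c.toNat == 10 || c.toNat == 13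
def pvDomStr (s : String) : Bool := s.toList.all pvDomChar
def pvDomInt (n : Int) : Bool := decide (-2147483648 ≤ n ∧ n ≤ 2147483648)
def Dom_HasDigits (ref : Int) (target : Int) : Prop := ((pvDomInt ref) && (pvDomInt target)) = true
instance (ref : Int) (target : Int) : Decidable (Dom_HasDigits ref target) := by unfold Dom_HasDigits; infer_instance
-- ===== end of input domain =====

-- B builds no membership structure at all: instead of A's growing digit set with its
-- early-exit size check, B rescans ref's digits with a fresh inner loop for every digit
-- of target (alternative: nested brute-force scan, no set).

-- termination measure helper, cited by every loop's decreasing_by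
theorem pvDiv10_toNat_lt (n : Int) (h : n > 0) : (PySem.Int.floordiv n 10).toNat < n.toNat := by
  rw [PySem.Int.floordiv_eq_ediv_of_pos (by norm_num)]
  omega

-- ===== PORT A =====
-- first while loop: collect ref's digits into the set s
def pvLoopRef (ref : Int) (s : PySem.Set Int) : PySem.Set Int :=
  if ref > 0 then
    pvLoopRef (PySem.Int.floordiv ref 10) (PySem.Set.add s (PySem.Int.mod ref 10))
  else s
termination_by ref.toNat
decreasing_by exact pvDiv10_toNat_lt _ (by assumption)

-- second while loop: add target's digits, early False when the set grows past size
def pvLoopTarget (target : Int) (s : PySem.Set Int) (size : Int) : Bool :=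
  if target > 0 then
    let s' := PySem.Set.add s (PySem.Int.mod target 10)
    if PySem.Set.len s' > size then false
    else pvLoopTarget (PySem.Int.floordiv target 10) s' size
  else true
termination_by target.toNat
decreasing_by exact pvDiv10_toNat_lt _ (by assumption)

def HasDigits (ref : Int) (target : Int) : Bool :=
  let s := pvLoopRef ref PySem.Set.empty
  pvLoopTarget target s (PySem.Set.len s)

-- ===== PORT B =====
-- inner 'while True' loop of Source B: returns false when r is exhausted (r <= 0 -> whole
-- function returns False), breaks (true) when r % 10 == d, else r //= 10
def pvScan (r : Int) (d : Int) : Bool :=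
  if r ≤ 0 then false
  else if PySem.Int.mod r 10 = d then true
  else pvScan (PySem.Int.floordiv r 10) d
termination_by r.toNat
decreasing_by exact pvDiv10_toNat_lt _ (by omega)

-- outer while loop of Source B over target's digits
def pvOuter (ref : Int) (t : Int) : Bool :=
  if t > 0 then
    if pvScan ref (PySem.Int.mod t 10) then pvOuter ref (PySem.Int.floordiv t 10)
    else false
  else true
termination_by t.toNat
decreasing_by exact pvDiv10_toNat_lt _ (by assumption)

def HasDigits_alt (ref : Int) (target : Int) : Bool :=
  pvOuter ref target

-- ===== PRECONDITION & SPEC =====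
def Spec_HasDigits (ref : Int) (target : Int) (out : Bool) : Prop := out = HasDigits_alt ref target
instance (ref : Int) (target : Int) (out : Bool) : Decidable (Spec_HasDigits ref target out) := by unfold Spec_HasDigits; infer_instance

-- ===== CLAIM (what is proved, stated in full; the proofs are below) =====
def Claim_equal_HasDigits : Prop := ∀ (ref : Int) (target : Int), Dom_HasDigits ref target → Spec_HasDigits ref target (HasDigits ref target)

-- ===== LEMMAS AND PROOFS =====

-- the digits a 'while n > 0: … n //= 10' loop visits, in order
def pvDigs (n : Int) : List Int :=
  if n > 0 then PySem.Int.mod n 10 :: pvDigs (PySem.Int.floordiv n 10) else []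
termination_by n.toNat
decreasing_by exact pvDiv10_toNat_lt _ (by assumption)

theorem pvDigs_pos (n : Int) (h : n > 0) :
    pvDigs n = PySem.Int.mod n 10 :: pvDigs (PySem.Int.floordiv n 10) := by
  conv_lhs => rw [pvDigs]
  rw [if_pos h]

theorem pvDigs_nonpos (n : Int) (h : ¬ n > 0) : pvDigs n = [] := by
  rw [pvDigs, if_neg h]

theorem pvLoopRef_mem (n : Int) (s : PySem.Set Int) (x : Int) :
    x ∈ pvLoopRef n s ↔ x ∈ s ∨ x ∈ pvDigs n := by
  fun_induction pvLoopRef n s with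
  | case1 n s h ih =>
    rw [ih, pvDigs_pos n h, PySem.Set.mem_add]
    simp only [List.mem_cons]
    tauto
  | case2 n s h =>
    rw [pvDigs_nonpos n h]
    simp

theorem pvLoopTarget_eq (size : Int) (t : Int) (s : PySem.Set Int) :
    size = PySem.Set.len s →
    pvLoopTarget t s size = decide (∀ d ∈ pvDigs t, d ∈ s) := by
  induction t, s using pvLoopTarget.induct size with
  | case1 t s h s' hlen =>
    intro hs
    rw [pvLoopTarget, if_pos h]
    rw [if_pos hlen]
    simp only [s'] at hlen
    by_cases hd : PySem.Int.mod t 10 ∈ s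
    · exfalso
      rw [PySem.Set.add_of_mem hd, ← hs] at hlen
      omega
    · rw [pvDigs_pos t h]
      symm
      simp only [decide_eq_false_iff_not]
      exact fun hall => hd (hall _ (List.mem_cons_self))
  | case2 t s h s' hlen ih =>
    intro hs
    rw [pvLoopTarget, if_pos h]
    rw [if_neg hlen]
    simp only [s'] at hlen ih
    by_cases hd : PySem.Int.mod t 10 ∈ s
    · have hadd : PySem.Set.add s (PySem.Int.mod t 10) = s := PySem.Set.add_of_mem hd
      simp only [hadd] at ih ⊢
      rw [ih hs, pvDigs_pos t h]
      simp only [List.mem_cons, decide_eq_decide]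
      constructor
      · intro hall d hdm
        rcases hdm with rfl | hdm
        · exact hd
        · exact hall d hdm
      · intro hall d hdm
        exact hall d (Or.inr hdm)
    · exfalso
      rw [PySem.Set.add_of_not_mem hd] at hlen
      simp only [PySem.Set.len, List.length_append, List.length_cons,
        List.length_nil, hs] at hlen hs
      omega
  | case3 t s h =>
    intro _
    rw [pvLoopTarget, if_neg h, pvDigs_nonpos t h]
    simp

-- A computes: every digit of target is a digit of ref
theorem pvA_eq (ref target : Int) :
    HasDigits ref target = decide (∀ d ∈ pvDigs target, d ∈ pvDigs ref) := by
  unfold HasDigits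
  rw [pvLoopTarget_eq _ _ _ rfl, decide_eq_decide]
  constructor
  · intro h d hd
    rcases (pvLoopRef_mem ref PySem.Set.empty d).mp (h d hd) with h0 | h0
    · simp [PySem.Set.empty] at h0
    · exact h0
  · intro h d hd
    exact (pvLoopRef_mem ref PySem.Set.empty d).mpr (Or.inr (h d hd))

-- B's inner scan decides membership in ref's digit list
theorem pvScan_eq (r d : Int) : pvScan r d = decide (d ∈ pvDigs r) := by
  fun_induction pvScan r d with
  | case1 r h =>
    rw [pvDigs_nonpos r (by omega)]
    simp
  | case2 r h hd =>
    rw [pvDigs_pos r (by omega)]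
    symm
    rw [decide_eq_true_iff]
    exact List.mem_cons.mpr (Or.inl hd.symm)
  | case3 r h hd ih =>
    rw [ih, pvDigs_pos r (by omega), decide_eq_decide]
    simp only [List.mem_cons]
    constructor
    · exact Or.inr
    · rintro (rfl | hm)
      · exact absurd rfl hd
      · exact hm
  
-- B computes the same predicate with its nested scan
theorem pvB_eq (ref target : Int) :
    HasDigits_alt ref target = decide (∀ d ∈ pvDigs target, d ∈ pvDigs ref) := by
  unfold HasDigits_alt
  fun_induction pvOuter ref target with
  | case1 t h hsc ih =>
    rw [ih, pvDigs_pos t h, decide_eq_decide]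
    rw [pvScan_eq] at hsc
    simp only [decide_eq_true_eq] at hsc
    simp only [List.mem_cons]
    constructor
    · rintro hall d (rfl | hm)
      · exact hsc
      · exact hall d hm
    · intro hall d hm
      exact hall d (Or.inr hm)
  | case2 t h hsc =>
    rw [pvScan_eq] at hsc
    rw [pvDigs_pos t h]
    symm
    rw [decide_eq_false_iff_not]
    intro hall
    exact hsc (decide_eq_true (by exact hall _ List.mem_cons_self))
  | case3 t h =>
    rw [pvDigs_nonpos t h]
    simp

-- ===== VERDICT (by name: the statement is the Claim_ definition above) =====
theorem HasDigits_spec : Claim_equal_HasDigits := by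
  intro ref target _
  unfold Spec_HasDigits
  rw [pvA_eq, pvB_eq]
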